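-- pv_equiv track=rewrite | github.com/babakatwork/neuro-san-tolstoy | coded_tools/tolstoy/parsing.py | parse_equivalence_report
-- ===== SOURCE A (Python) =====
-- def parse_equivalence_report(raw: str) -> tuple[bool, str | None]:
--     verdict = None
--     canonical = None
--     for line in raw.splitlines():
--         stripped = line.strip()
--         if stripped.upper().startswith("VERDICT:"):
--             verdict = stripped.split(":", 1)[1].strip().upper()
--         elif stripped.upper().startswith("CANONICAL:"):
--             canonical = stripped.split(":", 1)[1].strip() or None
--     return verdict == "SAME", canonical
-- ===== SOURCE B (Python) =====
-- def parse_equivalence_report(raw: str) -> tuple[bool, str | None]: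
--     # Reverse scan: the LAST matching line of A's forward overwrite loop is the
--     # FIRST match in reverse, so each field is a single first-match search.
--     lines = [line.strip() for line in reversed(raw.splitlines())]
--     v = next((l for l in lines if l.upper().startswith("VERDICT:")), None)
--     c = next((l for l in lines if l.upper().startswith("CANONICAL:")), None)
--     same = v is not None and v.split(":", 1)[1].strip().upper() == "SAME"
--     canonical = (c.split(":", 1)[1].strip() or None) if c is not None else None
--     return same, canonical
-- ===== Notes on version B (the rewrite author's own statement) =====
-- stated objective: alternative
-- what changed: Replaces A's forward overwrite loop holding a mutable (verdict, canonical) pair by a reverse scan that extracts each field as an independent first-match search over the reversed stripped lines.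
import Mathlib
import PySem

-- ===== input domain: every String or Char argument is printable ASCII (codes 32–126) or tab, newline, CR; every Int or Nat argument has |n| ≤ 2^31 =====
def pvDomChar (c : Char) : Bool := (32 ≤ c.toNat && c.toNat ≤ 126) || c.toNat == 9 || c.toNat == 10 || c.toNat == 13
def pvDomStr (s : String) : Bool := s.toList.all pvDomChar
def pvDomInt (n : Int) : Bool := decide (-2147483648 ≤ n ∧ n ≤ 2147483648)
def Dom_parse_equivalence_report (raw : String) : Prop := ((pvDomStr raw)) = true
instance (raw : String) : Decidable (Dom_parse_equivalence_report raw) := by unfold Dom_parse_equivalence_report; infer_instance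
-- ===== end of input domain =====

-- B replaces A's forward overwrite loop by a reverse-order first-match search per field; same return value, no speed claim.


-- shared sub-expressions of both Pythons (identical text in Source A and Source B)
def pvIsV (s : List Char) : Bool := PySem.Chars.startswith (PySem.Chars.upper s) ['V','E','R','D','I','C','T',':']
def pvIsC (s : List Char) : Bool := PySem.Chars.startswith (PySem.Chars.upper s) ['C','A','N','O','N','I','C','A','L',':']
-- s.split(":", 1)[1]; the fallback branch is unreachable at every call site (s starts with "VERDICT:"/"CANONICAL:", so ':' occurs)
def pvAfterColon (s : List Char) : List Char :=
  match PySem.Chars.splitMax? s [':'] 1 with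
  | some (_ :: t :: _) => t
  | _ => []
-- stripped.split(":", 1)[1].strip().upper()
def pvExtrV (s : List Char) : List Char := PySem.Chars.upper (PySem.Chars.strip (pvAfterColon s))
-- stripped.split(":", 1)[1].strip() or None
def pvExtrC (s : List Char) : Option (List Char) :=
  if PySem.Chars.strip (pvAfterColon s) = [] then none else some (PySem.Chars.strip (pvAfterColon s))

-- ===== PORT A =====
def pvStepA (p : Option (List Char) × Option (List Char)) (line : List Char) :
    Option (List Char) × Option (List Char) :=
  let stripped := PySem.Chars.strip line
  if pvIsV stripped then (some (pvExtrV stripped), p.2)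
  else if pvIsC stripped then (p.1, pvExtrC stripped)
  else p

def parse_equivalence_report (raw : String) : Bool × Option String :=
  let r := (PySem.Chars.splitlines raw.toList).foldl pvStepA (none, none)
  (decide (r.1 = some ['S','A','M','E']), r.2.map String.mk)

-- ===== PORT B =====
def parse_equivalence_report_alt (raw : String) : Bool × Option String :=
  let lines := ((PySem.Chars.splitlines raw.toList).reverse).map PySem.Chars.strip
  let v := lines.find? pvIsV
  let c := lines.find? pvIsC
  ((match v with | some s => decide (pvExtrV s = ['S','A','M','E']) | none => false),
   (match c with | some s => pvExtrC s | none => none).map String.mk)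

-- ===== PRECONDITION & SPEC =====
def Spec_parse_equivalence_report (raw : String) (out : Bool × Option String) : Prop := out = parse_equivalence_report_alt raw
instance (raw : String) (out : Bool × Option String) : Decidable (Spec_parse_equivalence_report raw out) := by unfold Spec_parse_equivalence_report; infer_instance

-- ===== CLAIM (what is proved, stated in full; the proofs are below) =====
def Claim_equal_parse_equivalence_report : Prop := ∀ (raw : String), Dom_parse_equivalence_report raw → Spec_parse_equivalence_report raw (parse_equivalence_report raw)

-- ===== LEMMAS AND PROOFS =====

-- a stripped line cannot start with both "VERDICT:" and "CANONICAL:"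
theorem pvIsV_isC (s : List Char) (h : pvIsV s = true) : pvIsC s = false := by
  unfold pvIsV at h
  unfold pvIsC
  rw [PySem.Chars.startswith_iff] at h
  by_contra hc
  rw [Bool.not_eq_false, PySem.Chars.startswith_iff] at hc
  rcases h with ⟨t1, e1⟩
  rcases hc with ⟨t2, e2⟩
  rw [← e1] at e2
  simp at e2

-- A's fold over the lines equals a first-match search on the reversed stripped lines, per field
theorem pvLoopA_eq (ls : List (List Char)) (p : Option (List Char) × Option (List Char)) :
    ls.foldl pvStepA p =
      ((match (ls.reverse.map PySem.Chars.strip).find? pvIsV with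
        | some s => some (pvExtrV s) | none => p.1),
       (match (ls.reverse.map PySem.Chars.strip).find? pvIsC with
        | some s => pvExtrC s | none => p.2)) := by
  induction ls generalizing p with
  | nil => simp
  | cons a ls ih =>
    simp only [List.foldl_cons, ih, List.reverse_cons, List.map_append, List.map_cons,
      List.map_nil, List.find?_append]
    cases hv : (ls.reverse.map PySem.Chars.strip).find? pvIsV <;>
      cases hc : (ls.reverse.map PySem.Chars.strip).find? pvIsC <;>
        simp only [Option.some_or, Option.none_or, pvStepA] <;>
          by_cases h1 : pvIsV (PySem.Chars.strip a) = true <;>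
            first
              | (simp [h1, pvIsV_isC _ h1])
              | (by_cases h2 : pvIsC (PySem.Chars.strip a) = true <;> simp [h1, h2])

-- ===== VERDICT (by name: the statement is the Claim_ definition above) =====
theorem parse_equivalence_report_spec : Claim_equal_parse_equivalence_report := by
  intro raw _
  unfold Spec_parse_equivalence_report parse_equivalence_report parse_equivalence_report_alt
  rw [pvLoopA_eq]
  simp only [List.map_reverse]
  cases hv : ((PySem.Chars.splitlines raw.toList).map PySem.Chars.strip).reverse.find? pvIsV <;>
    cases hc : ((PySem.Chars.splitlines raw.toList).map PySem.Chars.strip).reverse.find? pvIsC <;>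
      simp
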